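-- pv_equiv track=rewrite | github.com/oliverdillon/Machine_Learning_For_Medical_Images | Image_Preprocessing.py | getOutputPath
-- ===== SOURCE A (Python) =====
-- def getOutputPath(structureFile):
--     slashcount=0
--     output_path =""
--     for i, c in enumerate(structureFile):
--         if(c =='\\'or c =='/'):
--             slashcount+=1
--
--         if(slashcount== 2):
--             output_path =structureFile[:i+2]
--     return output_path
-- ===== SOURCE B (Python) =====
-- def getOutputPath(structureFile):
--     positions = [i for i, c in enumerate(structureFile) if c == '\\' or c == '/']
--     if len(positions) < 2:
--         return ""
--     if len(positions) == 2:
--         return structureFile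
--     return structureFile[:positions[2] + 1]
-- ===== Notes on version B (the rewrite author's own statement) =====
-- stated objective: simpler
-- what changed: Replaces A's running slash-counter loop that repeatedly overwrites output_path with a single pass collecting slash positions followed by one length test and a constant-time slice.
import Mathlib
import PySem

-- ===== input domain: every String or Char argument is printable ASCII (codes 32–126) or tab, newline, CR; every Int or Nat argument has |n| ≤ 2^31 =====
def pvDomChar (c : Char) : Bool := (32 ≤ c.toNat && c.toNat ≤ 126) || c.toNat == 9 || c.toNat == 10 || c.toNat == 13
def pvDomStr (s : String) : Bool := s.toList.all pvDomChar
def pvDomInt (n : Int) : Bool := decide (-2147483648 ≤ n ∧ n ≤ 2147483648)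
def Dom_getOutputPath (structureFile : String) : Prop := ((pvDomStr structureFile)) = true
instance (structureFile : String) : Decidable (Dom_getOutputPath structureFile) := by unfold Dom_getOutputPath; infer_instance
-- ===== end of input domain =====

-- B replaces A's running slash-counter loop (which repeatedly overwrites output_path)
-- by collecting the slash positions once and deciding with one length test and one slice (objective: simpler).


-- ===== PORT A =====
-- one loop step of A: bump the counter on '\' or '/', and while the counter is 2 overwrite
-- output_path with structureFile[:i+2] (a nonnegative upper bound, so Str.slice is exact)
def stepA (structureFile : String) (st : Int × String) (ic : Int × Char) : Int × String :=
  let slashcount := if ic.2 = '\\' ∨ ic.2 = '/' then st.1 + 1 else st.1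
  let output_path := if slashcount = 2 then PySem.Str.slice structureFile none (some (ic.1 + 2)) else st.2
  (slashcount, output_path)

def getOutputPath (structureFile : String) : String :=
  ((PySem.List.enumerate structureFile.toList).foldl (stepA structureFile) ((0 : Int), "")).2

-- ===== PORT B =====
-- all indices i with structureFile[i] a slash, in order
def slashPositions (cs : List Char) : List Int :=
  (PySem.List.enumerate cs).filterMap (fun ic => if ic.2 = '\\' ∨ ic.2 = '/' then some ic.1 else none)

def getOutputPath_alt (structureFile : String) : String :=
  let positions := slashPositions structureFile.toList
  if positions.length < 2 then ""
  else if positions.length = 2 then structureFile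
  else PySem.Str.slice structureFile none (some (PySem.List.pyGetD positions 2 0 + 1))

-- ===== PRECONDITION & SPEC =====
def Spec_getOutputPath (structureFile : String) (out : String) : Prop := out = getOutputPath_alt structureFile
instance (structureFile : String) (out : String) : Decidable (Spec_getOutputPath structureFile out) := by unfold Spec_getOutputPath; infer_instance

-- ===== CLAIM (what is proved, stated in full; the proofs are below) =====
def Claim_equal_getOutputPath : Prop := ∀ (structureFile : String), Dom_getOutputPath structureFile → Spec_getOutputPath structureFile (getOutputPath structureFile)

-- ===== LEMMAS AND PROOFS =====

theorem slashPositions_cons (ch : Char) (rest : List Char) (k : Int) :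
    (PySem.List.enumerate (ch :: rest) k).filterMap (fun ic => if ic.2 = '\\' ∨ ic.2 = '/' then some ic.1 else none)
      = if ch = '\\' ∨ ch = '/' then
          k :: (PySem.List.enumerate rest (k + 1)).filterMap (fun ic => if ic.2 = '\\' ∨ ic.2 = '/' then some ic.1 else none)
        else (PySem.List.enumerate rest (k + 1)).filterMap (fun ic => if ic.2 = '\\' ∨ ic.2 = '/' then some ic.1 else none) := by
  rw [PySem.List.enumerate_cons]
  by_cases h : ch = '\\' ∨ ch = '/' <;> simp [h]

-- every collected position is ≥ the start index
theorem slashPositions_ge (cs : List Char) (k : Int) :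
    ∀ p ∈ (PySem.List.enumerate cs k).filterMap (fun ic => if ic.2 = '\\' ∨ ic.2 = '/' then some ic.1 else none), k ≤ p := by
  induction cs generalizing k with
  | nil => simp [PySem.List.enumerate_nil]
  | cons ch rest ih =>
    intro p hp
    rw [slashPositions_cons] at hp
    by_cases h : ch = '\\' ∨ ch = '/'
    · rw [if_pos h] at hp
      rcases List.mem_cons.mp hp with hp | hp
      · omega
      · have := ih (k + 1) p hp; omega
    · rw [if_neg h] at hp
      have := ih (k + 1) p hp; omega

theorem loopA_ge3 (s : String) (cs : List Char) (k c : Int) (out : String) (hc : 2 < c) :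
    ((PySem.List.enumerate cs k).foldl (stepA s) (c, out)).2 = out := by
  induction cs generalizing k c with
  | nil => simp [PySem.List.enumerate_nil]
  | cons ch rest ih =>
    rw [PySem.List.enumerate_cons, List.foldl_cons]
    by_cases h : ch = '\\' ∨ ch = '/' <;>
      simp only [stepA, h, if_false, if_pos] <;>
      · rw [if_neg (by omega)]
        exact ih (k + 1) _ (by omega)

theorem loopA_2 (s : String) (cs : List Char) (k : Int) (out : String) :
    ((PySem.List.enumerate cs k).foldl (stepA s) (2, out)).2 =
      match (PySem.List.enumerate cs k).filterMap (fun ic => if ic.2 = '\\' ∨ ic.2 = '/' then some ic.1 else none) with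
      | [] => if cs = [] then out else PySem.Str.slice s none (some (k + cs.length + 1))
      | p :: _ => if p = k then out else PySem.Str.slice s none (some (p + 1)) := by
  induction cs generalizing k out with
  | nil => simp [PySem.List.enumerate_nil]
  | cons ch rest ih =>
    rw [slashPositions_cons, PySem.List.enumerate_cons, List.foldl_cons]
    by_cases h : ch = '\\' ∨ ch = '/'
    · simp only [stepA, h, if_true, if_neg (show ¬(2:Int)+1 = 2 by omega)]
      rw [loopA_ge3 s rest (k+1) (2+1) out (by omega)]
    · simp only [stepA, h, if_false, if_pos rfl]
      rw [ih (k + 1)]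
      cases hpos : (PySem.List.enumerate rest (k+1)).filterMap (fun ic => if ic.2 = '\\' ∨ ic.2 = '/' then some ic.1 else none) with
      | nil =>
        cases rest with
        | nil => simp only [↓reduceIte, List.length_nil]; rw [if_neg (by simp)]; congr 2; push_cast [List.length_cons, List.length_nil]; ring
        | cons r rs =>
          simp only [↓reduceIte, List.length_cons]
          rw [if_neg (by simp)]
          congr 2; push_cast [List.length_cons, List.length_nil]; ring
      | cons p ps =>
        have hpk : k + 1 ≤ p := slashPositions_ge rest (k+1) p (by rw [hpos]; simp)
        simp only []
        split_ifs with h1 h2 h2 <;> try (exfalso; omega)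
        · subst h1; congr 2; ring
        · rfl

theorem loopA_1 (s : String) (cs : List Char) (k : Int) (out : String) :
    ((PySem.List.enumerate cs k).foldl (stepA s) (1, out)).2 =
      match (PySem.List.enumerate cs k).filterMap (fun ic => if ic.2 = '\\' ∨ ic.2 = '/' then some ic.1 else none) with
      | [] => out
      | [_] => PySem.Str.slice s none (some (k + cs.length + 1))
      | _ :: q :: _ => PySem.Str.slice s none (some (q + 1)) := by
  induction cs generalizing k out with
  | nil => simp [PySem.List.enumerate_nil]
  | cons ch rest ih =>
    rw [slashPositions_cons, PySem.List.enumerate_cons, List.foldl_cons]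
    by_cases h : ch = '\\' ∨ ch = '/'
    · simp only [stepA, h, if_true]
      norm_num
      rw [loopA_2 s rest (k+1)]
      cases hpos : (PySem.List.enumerate rest (k+1)).filterMap (fun ic => if ic.2 = '\\' ∨ ic.2 = '/' then some ic.1 else none) with
      | nil =>
        cases rest with
        | nil => simp only [↓reduceIte, List.length_cons, List.length_nil]; congr 2; push_cast; ring
        | cons r rs =>
          simp only [↓reduceIte, reduceCtorEq, List.length_cons]
          congr 2; push_cast [List.length_cons, List.length_nil]; ring
      | cons q qs =>
        have hqk : k + 1 ≤ q := slashPositions_ge rest (k+1) q (by rw [hpos]; simp)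
        simp only []
        split_ifs with h1 <;> try (exfalso; omega)
        · subst h1; congr 2; ring
        · rfl
    · simp only [stepA, h, if_false, if_neg (show ¬(1:Int) = 2 by omega)]
      rw [ih (k + 1)]
      cases hpos : (PySem.List.enumerate rest (k+1)).filterMap (fun ic => if ic.2 = '\\' ∨ ic.2 = '/' then some ic.1 else none) with
      | nil => rfl
      | cons q qs =>
        cases qs with
        | nil =>
          simp only [List.length_cons]
          congr 2; push_cast [List.length_cons, List.length_nil]; ring
        | cons r rs => rfl

theorem loopA_0 (s : String) (cs : List Char) (k : Int) (out : String) :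
    ((PySem.List.enumerate cs k).foldl (stepA s) (0, out)).2 =
      match (PySem.List.enumerate cs k).filterMap (fun ic => if ic.2 = '\\' ∨ ic.2 = '/' then some ic.1 else none) with
      | [] => out
      | [_] => out
      | [_, _] => PySem.Str.slice s none (some (k + cs.length + 1))
      | _ :: _ :: r :: _ => PySem.Str.slice s none (some (r + 1)) := by
  induction cs generalizing k out with
  | nil => simp [PySem.List.enumerate_nil]
  | cons ch rest ih =>
    rw [slashPositions_cons, PySem.List.enumerate_cons, List.foldl_cons]
    by_cases h : ch = '\\' ∨ ch = '/'
    · simp only [stepA, h, if_true]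
      norm_num
      rw [loopA_1 s rest (k+1)]
      cases hpos : (PySem.List.enumerate rest (k+1)).filterMap (fun ic => if ic.2 = '\\' ∨ ic.2 = '/' then some ic.1 else none) with
      | nil => rfl
      | cons q qs =>
        cases qs with
        | nil =>
          simp only [List.length_cons]
          congr 2; push_cast [List.length_cons, List.length_nil]; ring
        | cons r rs => rfl
    · simp only [stepA, h, if_false, if_neg (show ¬(0:Int) = 2 by omega)]
      rw [ih (k + 1)]
      cases hpos : (PySem.List.enumerate rest (k+1)).filterMap (fun ic => if ic.2 = '\\' ∨ ic.2 = '/' then some ic.1 else none) with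
      | nil => rfl
      | cons q qs =>
        cases qs with
        | nil => rfl
        | cons r rs =>
          cases rs with
          | nil =>
            simp only [List.length_cons]
            congr 2; push_cast [List.length_cons, List.length_nil]; ring
          | cons t ts => rfl

theorem slice_full (s : String) (b : Int) (hb : (s.toList.length : Int) ≤ b) :
    PySem.Str.slice s none (some b) = s := by
  apply String.toList_inj.mp
  have h0 : 0 ≤ b := le_trans (by positivity) hb
  simp only [PySem.Str.toList_slice, PySem.Chars.slice_eq_listSlice, PySem.List.slice_to _ h0]
  exact List.take_of_length_le (by omega)

theorem getOutputPath_spec : Claim_equal_getOutputPath := by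
  intro s _
  show getOutputPath s = getOutputPath_alt s
  unfold getOutputPath getOutputPath_alt slashPositions
  rw [loopA_0 s s.toList 0 ""]
  cases hpos : (PySem.List.enumerate s.toList (0:Int)).filterMap (fun ic => if ic.2 = '\\' ∨ ic.2 = '/' then some ic.1 else none) with
  | nil => simp
  | cons p ps =>
    cases ps with
    | nil => simp
    | cons q qs =>
      cases qs with
      | nil =>
        simp only [List.length_cons, List.length_nil]
        rw [if_neg (by norm_num), if_pos (by norm_num)]
        apply slice_full
        omega
      | cons r rs =>
        simp only [List.length_cons]
        rw [if_neg (by omega), if_neg (by omega)]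
        have h2 : PySem.List.pyGetD (p :: q :: r :: rs) 2 0 = r := by simp [pysem]
        rw [h2]
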